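-- pv_equiv track=rewrite | github.com/derricw/publickey | crypt.py | text2int
-- ===== SOURCE A (Python) =====
-- BLOCK_SIZE = 128 # in bytes
--
-- def text2int(msg, block_size=BLOCK_SIZE):
--     """ Converts a message into integer blocks that can be encoded.
--     WARNING: TRAILING NULL TERMINATORS WILL BE STRIPPED.
--     """
--     msg = msg.rstrip("\0").encode("ascii")
--     ints = []
--     for block in range(0, len(msg), block_size):
--         block_val = 0
--         for i in range(block, min(block + block_size, len(msg))):
--             # create int repr for block by adding bytes raised to their index
--             #    C0 * (256^0) + C1 * (256^1) + ... + Cn * (256^n)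
--             block_val += msg[i] * (256 ** (i % block_size))
--         ints.append(block_val)
--     return ints
-- ===== SOURCE B (Python) =====
-- BLOCK_SIZE = 128  # in bytes
--
-- def text2int(msg, block_size=BLOCK_SIZE):
--     """ Converts a message into integer blocks that can be encoded.
--     WARNING: TRAILING NULL TERMINATORS WILL BE STRIPPED.
--     """
--     data = msg.rstrip("\0").encode("ascii")
--     return [int.from_bytes(data[i:i + block_size], "little")
--             for i in range(0, len(data), block_size)]
-- ===== Notes on version B (the rewrite author's own statement) =====
-- stated objective: idiomatic
-- what changed: The explicit nested loops with per-byte bignum powers 256**(i % block_size) are replaced by a comprehension that converts each block_size-byte slice with int.from_bytes(..., 'little'), eliminating the inner loop and list mutation entirely.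
import Mathlib
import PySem

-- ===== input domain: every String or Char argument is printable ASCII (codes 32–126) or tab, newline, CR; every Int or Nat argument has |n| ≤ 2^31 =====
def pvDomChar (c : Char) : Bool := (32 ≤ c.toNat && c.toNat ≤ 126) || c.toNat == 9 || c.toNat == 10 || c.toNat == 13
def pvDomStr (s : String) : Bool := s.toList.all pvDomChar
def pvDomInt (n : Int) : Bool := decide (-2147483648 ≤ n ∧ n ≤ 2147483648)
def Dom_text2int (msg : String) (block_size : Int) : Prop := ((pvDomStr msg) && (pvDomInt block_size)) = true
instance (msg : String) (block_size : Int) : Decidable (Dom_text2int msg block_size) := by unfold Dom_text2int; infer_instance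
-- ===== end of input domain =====

-- B replaces A's nested loops (with a per-byte power 256^(i % block_size)) by a comprehension
-- converting each slice with int.from_bytes(..., "little"); return value only, no mutation.

-- msg.rstrip("\0").encode("ascii"): drop trailing NULs, then the list of byte values.
-- Ported by hand (exact on Dom: every char code is ≤ 126, so encode("ascii") never raises).
def pvBytes (msg : String) : List Int :=
  ((msg.toList.reverse.dropWhile (fun c => c = Char.ofNat 0)).reverse).map (fun c => (c.toNat : Int))

-- ===== PORT A =====
def text2int (msg : String) (block_size : Int) : List Int :=
  let m : List Int := pvBytes msg
  let n : Int := m.length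
  (PySem.List.pyRange 0 n block_size).foldl (fun ints block =>
    let block_val : Int :=
      (PySem.List.pyRange block (min (block + block_size) n) 1).foldl
        (fun acc i => acc + PySem.List.pyGetD m i 0 * 256 ^ (PySem.Int.mod i block_size).toNat) 0
    ints ++ [block_val]) []

-- ===== PORT B =====
-- int.from_bytes(bytes, "little"): the little-endian base-256 value of the byte list (exact).
def pvFromBytesLE (l : List Int) : Int := l.foldr (fun c v => v * 256 + c) 0

def text2int_alt (msg : String) (block_size : Int) : List Int :=
  let data : List Int := pvBytes msg
  (PySem.List.pyRange 0 (data.length : Int) block_size).map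
    (fun i => pvFromBytesLE (PySem.List.slice data (some i) (some (i + block_size))))

-- ===== PRECONDITION & SPEC =====
-- block_size = 0 makes Python's range(0, len, 0) raise ValueError in both A and B.
def Pre_text2int (msg : String) (block_size : Int) : Prop := block_size ≠ 0
instance (msg : String) (block_size : Int) : Decidable (Pre_text2int msg block_size) := by unfold Pre_text2int; infer_instance
def pvWitness_text2int : String × Int := ("hello world", 4)

def Spec_text2int (msg : String) (block_size : Int) (out : List Int) : Prop := out = text2int_alt msg block_size
instance (msg : String) (block_size : Int) (out : List Int) : Decidable (Spec_text2int msg block_size out) := by unfold Spec_text2int; infer_instance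

-- ===== CLAIM (what is proved, stated in full; the proofs are below) =====
def Claim_equal_text2int : Prop := ∀ (msg : String) (block_size : Int), Dom_text2int msg block_size → Pre_text2int msg block_size → Spec_text2int msg block_size (text2int msg block_size)

-- ===== LEMMAS AND PROOFS =====

lemma sum_eq_le (data : List Int) :
    ∀ (m b : Nat), b + m ≤ data.length →
      ((List.range m).map (fun k => data.getD (b + k) 0 * 256 ^ k)).sum
        = pvFromBytesLE ((data.drop b).take m) := by
  intro m
  induction m with
  | zero => intro b _; simp [pvFromBytesLE]
  | succ m ih =>
      intro b hb
      rw [List.range_succ_eq_map]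
      have hb' : b < data.length := by omega
      have hdrop : data.drop b = data[b] :: data.drop (b + 1) :=
        List.drop_eq_getElem_cons hb'
      have ih' := ih (b + 1) (by omega)
      simp only [List.map_cons, List.map_map, List.sum_cons]
      have hmap : ((List.range m).map ((fun k => data.getD (b + k) 0 * 256 ^ k) ∘ Nat.succ)).sum
          = 256 * ((List.range m).map (fun k => data.getD (b + 1 + k) 0 * 256 ^ k)).sum := by
        rw [← List.sum_map_mul_left]
        congr 1
        apply List.map_congr_left
        intro k _
        simp only [Function.comp, pow_succ]
        have : b + k.succ = b + 1 + k := by omega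
        rw [this]; ring
      rw [hmap, ih', hdrop]
      simp only [List.take_succ_cons, pvFromBytesLE, List.foldr_cons]
      have : data.getD (b + 0) 0 = data[b] := by simp [List.getD_eq_getElem?_getD, hb']
      rw [this]
      ring

-- per-block equality: A's power sum over [b, min(b+bs,n)) equals from_bytes of the slice
lemma block_eq (data : List Int) (bs b : Int) (hbs : 0 < bs)
    (hmem : b ∈ PySem.List.pyRange 0 (data.length : Int) bs) :
    (PySem.List.pyRange b (min (b + bs) (data.length : Int)) 1).foldl
        (fun acc i => acc + PySem.List.pyGetD data i 0 * 256 ^ (PySem.Int.mod i bs).toNat) 0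
      = pvFromBytesLE (PySem.List.slice data (some b) (some (b + bs))) := by
  obtain ⟨hb0, hbn, hdvd⟩ := (PySem.List.mem_pyRange_iff_of_pos hbs b).mp hmem
  obtain ⟨k, hk⟩ := hdvd
  have hcong : (PySem.List.pyRange b (min (b + bs) (data.length : Int)) 1).foldl
      (fun acc i => acc + PySem.List.pyGetD data i 0 * 256 ^ (PySem.Int.mod i bs).toNat) 0
      = (PySem.List.pyRange b (min (b + bs) (data.length : Int)) 1).foldl
      (fun acc i => acc + PySem.List.pyGetD data i 0 * 256 ^ (i - b).toNat) 0 := by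
    apply PySem.List.foldl_congr_mem
    intro acc i hi
    rw [PySem.List.mem_pyRange_one] at hi
    have hie : i < b + bs := lt_of_lt_of_le hi.2 (min_le_left _ _)
    have hmod : PySem.Int.mod i bs = i - b := by
      rw [PySem.Int.mod_eq_emod_of_pos hbs]
      have hd : i = (i - b) + bs * k := by omega
      conv_lhs => rw [hd]
      rw [Int.add_mul_emod_self_left, Int.emod_eq_of_lt (by omega) (by omega)]
    rw [hmod]
  rw [hcong, PySem.List.foldl_add, PySem.List.pyRange_one]
  have hslice : PySem.List.slice data (some b) (some (b + bs))
      = (data.drop b.toNat).take ((min (b + bs) (data.length : Int) - b).toNat) := by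
    rw [PySem.List.slice_toNat data hb0 (by omega)]
    rcases le_or_gt (b + bs) (data.length : Int) with hle | hgt
    · congr 1
      omega
    · rw [List.take_of_length_le (by simp [List.length_drop]; omega),
        List.take_of_length_le (by simp [List.length_drop]; omega)]
  rw [hslice, ← sum_eq_le data ((min (b + bs) (data.length : Int) - b).toNat) b.toNat (by omega),
    List.map_map, zero_add]
  congr 1
  apply List.map_congr_left
  intro j hj
  rw [List.mem_range] at hj
  simp only [Function.comp]
  have hidx : b + (j : Int) = ((b.toNat + j : Nat) : Int) := by omega
  rw [hidx, PySem.List.pyGetD_natCast]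
  have hexp : (((b.toNat + j : Nat) : Int) - b).toNat = j := by omega
  rw [hexp]

lemma pyRange_neg_nil (n s : Int) (hn : 0 ≤ n) (hs : s < 0) :
    PySem.List.pyRange 0 n s = [] := by
  unfold PySem.List.pyRange
  have h1 : ¬ s = 0 := by omega
  have h2 : ¬ 0 < s := by omega
  have h3 : ¬ n < 0 := by omega
  simp [h1, h2, h3]

-- A's append-accumulator loop builds exactly the map of the per-block value
lemma foldl_append_map {α β : Type} (l : List α) (f : α → β) :
    ∀ (init : List β), l.foldl (fun acc x => acc ++ [f x]) init = init ++ l.map f := by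
  induction l with
  | nil => intro init; simp
  | cons x xs ih => intro init; simp [List.foldl_cons, ih]

-- ===== VERDICT (by name: the statement is the Claim_ definition above) =====
theorem text2int_spec : Claim_equal_text2int := by
  intro msg block_size _ hpre
  unfold Spec_text2int text2int text2int_alt
  simp only []
  rcases lt_or_gt_of_ne hpre with hneg | hpos
  · rw [pyRange_neg_nil _ _ (by positivity) hneg]
    rfl
  · rw [foldl_append_map]
    simp only [List.nil_append]
    apply List.map_congr_left
    intro b hb
    exact block_eq (pvBytes msg) block_size b hpos hb
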